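-- pv_equiv track=rewrite | github.com/maria-pugacheva/LeetCode | src/python/_01_easy/_2148_count-elements-with-strictly-smaller-and-greater-elements.py | solution
-- ===== SOURCE A (Python) =====
-- from typing import List
--
-- def solution(nums: List[int]) -> int:
--     """Given an integer array nums, return the number of elements that
--     have both a strictly smaller and a strictly greater element appear
--     in nums.
--
--     Examples:
--         >>> solution([1, 1, 1, 1])
--         0
--         >>> solution([-3, 3, 3, 90])
--         2
--         >>> solution([11, 7, 2, 15])
--         2
--     """
--     mx = max(nums)
--     mn = min(nums)
--     cnt = 0
--     for n in nums:
--         if n != mx and n != mn: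
--             cnt += 1
--     return cnt
-- ===== SOURCE B (Python) =====
-- from typing import List
--
-- def solution(nums: List[int]) -> int:
--     mx = max(nums)
--     mn = min(nums)
--     if mn == mx:
--         return 0
--     return len(nums) - nums.count(mn) - nums.count(mx)
-- ===== Notes on version B (the rewrite author's own statement) =====
-- stated objective: simpler
-- what changed: Replaces the per-element boundary-test loop with a closed-form count-and-subtract: len(nums) - count(min) - count(max), with a special case 0 when all elements are equal.
-- outside the precondition, e.g. on solution([]): A raises ValueError, B raises ValueError
import Mathlib
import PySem

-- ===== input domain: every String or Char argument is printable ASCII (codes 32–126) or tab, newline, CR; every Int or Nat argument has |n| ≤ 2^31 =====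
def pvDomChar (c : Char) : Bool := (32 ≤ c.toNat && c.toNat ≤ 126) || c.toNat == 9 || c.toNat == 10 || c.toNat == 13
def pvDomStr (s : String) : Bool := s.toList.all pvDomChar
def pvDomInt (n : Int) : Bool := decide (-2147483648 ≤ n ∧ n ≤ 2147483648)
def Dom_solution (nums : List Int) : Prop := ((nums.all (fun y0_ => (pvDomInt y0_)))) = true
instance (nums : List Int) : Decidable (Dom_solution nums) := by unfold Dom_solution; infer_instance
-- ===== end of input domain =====

-- B replaces A's per-element boundary-test loop with a closed-form count-and-subtract
-- (len - count(min) - count(max), 0 when all equal): simpler decomposition, same cost.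

-- ===== PORT A =====
def solution (nums : List Int) : Int :=
  match PySem.List.max? nums (fun x => x), PySem.List.min? nums (fun x => x) with
  | some mx, some mn =>
      nums.foldl (fun cnt n => if n ≠ mx ∧ n ≠ mn then cnt + 1 else cnt) 0
  | _, _ => 0

-- ===== PORT B =====
def solution_alt (nums : List Int) : Int :=
  match PySem.List.max? nums (fun x => x) with
  | none => 0
  | some mx =>
    match PySem.List.min? nums (fun x => x) with
    | none => 0
    | some mn =>
      if mn = mx then 0
      else (nums.length : Int) - (PySem.List.count nums mn : Int) - (PySem.List.count nums mx : Int)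

-- ===== PRECONDITION & SPEC =====
-- Python's max/min raise ValueError on the empty list; Pre_ excludes only [].
def Pre_solution (nums : List Int) : Prop := nums ≠ []
instance (nums : List Int) : Decidable (Pre_solution nums) := by unfold Pre_solution; infer_instance
def pvWitness_solution : List Int := ([1, 7, 7, 2])

def Spec_solution (nums : List Int) (out : Int) : Prop := out = solution_alt nums
instance (nums : List Int) (out : Int) : Decidable (Spec_solution nums out) := by unfold Spec_solution; infer_instance

-- ===== CLAIM (what is proved, stated in full; the proofs are below) =====
def Claim_equal_solution : Prop := ∀ (nums : List Int), Dom_solution nums → Pre_solution nums → Spec_solution nums (solution nums)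

-- ===== LEMMAS AND PROOFS =====
lemma countP_split (l : List Int) (mx mn : Int) (h : mn ≠ mx) :
    (l.countP (fun n => !decide (n = mx) && !decide (n = mn)) : Int)
      = (l.length : Int) - (l.count mn : Int) - (l.count mx : Int) := by
  induction l with
  | nil => simp
  | cons a t ih =>
      rw [List.countP_cons, List.count_cons, List.count_cons, List.length_cons]
      by_cases hx : a = mx <;> by_cases hn : a = mn <;>
        simp [hx, hn, Ne.symm h] <;> omega

lemma countP_all_eq (l : List Int) (m : Int) (h : ∀ y ∈ l, y = m) :
    l.countP (fun n => !decide (n = m) && !decide (n = m)) = 0 := by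
  rw [List.countP_eq_zero]
  intro a ha
  simp [h a ha]

-- ===== VERDICT (by name: the statement is the Claim_ definition above) =====
theorem solution_spec : Claim_equal_solution := by
  intro nums _ hpre
  unfold Spec_solution solution solution_alt
  rcases hmx : PySem.List.max? nums (fun x => x) with _ | mx
  · exact absurd ((PySem.List.max?_eq_none_iff _ _).mp hmx) hpre
  rcases hmn : PySem.List.min? nums (fun x => x) with _ | mn
  · exact absurd ((PySem.List.min?_eq_none_iff _ _).mp hmn) hpre
  simp only
  rw [PySem.List.foldl_ite_add_one (fun n => n ≠ mx ∧ n ≠ mn)]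
  simp only [ne_eq, decide_not, Bool.decide_and, PySem.List.count_eq]
  by_cases heq : mn = mx
  · subst heq
    have hall : ∀ y ∈ nums, y = mn := by
      intro y hy
      have h1 := PySem.List.max?_isMax hmx y hy
      have h2 := PySem.List.min?_isMin hmn y hy
      omega
    rw [if_pos rfl, countP_all_eq nums mn hall]
    simp
  · rw [if_neg heq, Int.zero_add, countP_split nums mx mn heq]
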